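-- pv_equiv track=rewrite | github.com/SungHuiChai/skillsense-backend | app/aggregation/data_aggregator.py | _count_cross_validated_skills
-- ===== SOURCE A (Python) =====
-- from typing import Dict, Any, List, Optional
--
-- def _count_cross_validated_skills(all_skills: List[Dict[str, Any]]) -> int:
--     """
--     Count skills found in multiple sources.
--
--     Args:
--         all_skills: List of skill dictionaries
--
--     Returns:
--         Number of cross-validated skills
--     """
--     skill_sources = {}
--     for skill in all_skills:
--         name = skill['name'].lower()
--         source = skill['source']
--         if name not in skill_sources:
--             skill_sources[name] = set()
--         skill_sources[name].add(source)
--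
--     # Count skills found in more than one source
--     cross_validated = sum(1 for sources in skill_sources.values() if len(sources) > 1)
--     return cross_validated
-- ===== SOURCE B (Python) =====
-- def _count_cross_validated_skills(all_skills):
--     # Single pass over first occurrences: a skill counts iff its (lowercased)
--     # name has not been seen before AND some skill in the list carries the same
--     # name with a different source (an existence scan instead of grouping
--     # sources per name).
--     count = 0
--     seen = []
--     for skill in all_skills:
--         name = skill['name'].lower()
--         source = skill['source']
--         if name in seen:
--             continue
--         seen.append(name)
--         if any(t['name'].lower() == name and t['source'] != source for t in all_skills):
--             count += 1
--     return count
-- ===== Notes on version B (the rewrite author's own statement) =====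
-- stated objective: alternative
-- what changed: Drops A's dict-of-sets grouping entirely: B makes one pass keeping only a list of already-seen lowercased names and, at each first occurrence of a name, decides cross-validation by a direct existence scan for another skill with the same name but a different source.
import Mathlib
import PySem

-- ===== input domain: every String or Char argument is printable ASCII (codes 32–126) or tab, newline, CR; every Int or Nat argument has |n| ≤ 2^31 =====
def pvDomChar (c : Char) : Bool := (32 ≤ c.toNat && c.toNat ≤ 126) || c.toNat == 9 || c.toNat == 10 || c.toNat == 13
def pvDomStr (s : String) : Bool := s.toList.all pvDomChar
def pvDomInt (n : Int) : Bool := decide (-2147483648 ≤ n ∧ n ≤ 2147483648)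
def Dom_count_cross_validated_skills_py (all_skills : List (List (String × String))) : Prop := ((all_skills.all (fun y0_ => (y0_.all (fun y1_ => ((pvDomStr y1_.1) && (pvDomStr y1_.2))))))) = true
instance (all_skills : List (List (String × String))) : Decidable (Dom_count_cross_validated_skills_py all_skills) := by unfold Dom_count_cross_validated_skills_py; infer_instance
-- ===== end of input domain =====

-- B replaces A's grouping of sources into a dict of per-name sets by a single pass over
-- first occurrences of each lowercased name with an existence scan for a differing source
-- (alternative decomposition; same results, no grouping structure maintained).

-- shared lookup helpers: skill['name'].lower() and skill['source'] (total forms; Pre_ demands the keys)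
def pvNameOf (skill : List (String × String)) : String :=
  PySem.Str.lower ((PySem.Dict.mk skill).getD "name" "")
def pvSourceOf (skill : List (String × String)) : String :=
  (PySem.Dict.mk skill).getD "source" ""

-- ===== PORT A =====
def count_cross_validated_skills_py (all_skills : List (List (String × String))) : Int :=
  let skill_sources : PySem.Dict String (PySem.Set String) :=
    all_skills.foldl (fun d skill =>
      let name := pvNameOf skill
      let source := pvSourceOf skill
      let d := if d.contains name then d else d.insert name PySem.Set.empty
      d.modify name PySem.Set.empty (fun s => PySem.Set.add s source)) PySem.Dict.empty
  (skill_sources.values.map (fun s => if 1 < PySem.Set.len s then (1 : Int) else 0)).sum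

-- ===== PORT B =====
def count_cross_validated_skills_py_alt (all_skills : List (List (String × String))) : Int :=
  (all_skills.foldl (fun st skill =>
      let name := pvNameOf skill
      let source := pvSourceOf skill
      if st.2.contains name then st
      else
        let seen := st.2 ++ [name]
        if all_skills.any (fun t => pvNameOf t == name && !(pvSourceOf t == source)) then
          (st.1 + 1, seen)
        else (st.1, seen)) ((0 : Int), ([] : List String))).1

-- ===== PRECONDITION & SPEC =====
-- Pre_ excludes exactly the skill dicts missing a 'name' or 'source' key, where the Python A raises KeyError.
def Pre_count_cross_validated_skills_py (all_skills : List (List (String × String))) : Prop :=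
  ∀ skill ∈ all_skills, (PySem.Dict.mk skill).contains "name" = true ∧ (PySem.Dict.mk skill).contains "source" = true
instance (all_skills : List (List (String × String))) : Decidable (Pre_count_cross_validated_skills_py all_skills) := by
  unfold Pre_count_cross_validated_skills_py; infer_instance

def pvWitness_count_cross_validated_skills_py : (List (List (String × String))) :=
  [[("name", "Python"), ("source", "cv")], [("name", "python"), ("source", "github")]]

def Spec_count_cross_validated_skills_py (all_skills : List (List (String × String))) (out : Int) : Prop := out = count_cross_validated_skills_py_alt all_skills
instance (all_skills : List (List (String × String))) (out : Int) : Decidable (Spec_count_cross_validated_skills_py all_skills out) := by unfold Spec_count_cross_validated_skills_py; infer_instance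

-- ===== CLAIM (what is proved, stated in full; the proofs are below) =====
def Claim_equal_count_cross_validated_skills_py : Prop := ∀ (all_skills : List (List (String × String))), Dom_count_cross_validated_skills_py all_skills → Pre_count_cross_validated_skills_py all_skills → Spec_count_cross_validated_skills_py all_skills (count_cross_validated_skills_py all_skills)

-- ===== LEMMAS AND PROOFS =====

-- the per-name indicator both programs compute, in A's shape: > 1 distinct sources
def pvIndA (l : List (List (String × String))) (n : String) : Int :=
  if 1 < PySem.Set.len (PySem.Set.ofList ((l.filter (fun t => pvNameOf t == n)).map pvSourceOf)) then 1 else 0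

-- B's per-skill indicator: some skill with the same name carries a different source
def pvIndB (l : List (List (String × String))) (skill : List (String × String)) : Int :=
  if l.any (fun t => pvNameOf t == pvNameOf skill && !(pvSourceOf t == pvSourceOf skill)) then 1 else 0

-- the first occurrence of each name of s whose name is not in seen, in order
def pvFirsts (seen : List String) : List (List (String × String)) → List (List (String × String))
  | [] => []
  | sk :: s =>
      if seen.contains (pvNameOf sk) then pvFirsts seen s
      else sk :: pvFirsts (seen ++ [pvNameOf sk]) s

lemma pvFirsts_subset (s : List (List (String × String))) :
    ∀ seen sk, sk ∈ pvFirsts seen s → sk ∈ s := by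
  induction s with
  | nil => intro seen sk h; simp [pvFirsts] at h
  | cons a s ih =>
    intro seen sk h
    unfold pvFirsts at h
    by_cases hc : seen.contains (pvNameOf a)
    · simp only [hc, if_true] at h; exact List.mem_cons_of_mem _ (ih _ _ h)
    · simp only [hc, Bool.false_eq_true, if_false, List.mem_cons] at h
      rcases h with h | h
      · exact h ▸ List.mem_cons_self
      · exact List.mem_cons_of_mem _ (ih _ _ h)

-- B's fold, characterised: count = sum of indicators over first occurrences, seen grows by their names
lemma pvFoldB_eq (l : List (List (String × String))) (s : List (List (String × String))) :
    ∀ (seen : List String) (c : Int),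
    s.foldl (fun st skill =>
      let name := pvNameOf skill
      let source := pvSourceOf skill
      if st.2.contains name then st
      else
        let seen := st.2 ++ [name]
        if l.any (fun t => pvNameOf t == name && !(pvSourceOf t == source)) then
          (st.1 + 1, seen)
        else (st.1, seen)) (c, seen)
      = (c + ((pvFirsts seen s).map (pvIndB l)).sum, seen ++ (pvFirsts seen s).map pvNameOf) := by
  induction s with
  | nil => intro seen c; simp [pvFirsts]
  | cons sk s ih =>
    intro seen c
    simp only [List.foldl_cons]
    by_cases hc : seen.contains (pvNameOf sk)
    · simp only [hc, if_true, pvFirsts]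
      exact ih seen c
    · simp only [hc, Bool.false_eq_true, if_false, pvFirsts]
      by_cases ha : l.any (fun t => pvNameOf t == pvNameOf sk && !(pvSourceOf t == pvSourceOf sk))
      · rw [if_pos ha, ih (seen ++ [pvNameOf sk]) (c + 1)]
        simp only [List.map_cons, List.sum_cons, pvIndB, ha, if_true, List.append_assoc,
          List.singleton_append, Prod.mk.injEq]
        exact ⟨by ring, trivial⟩
      · rw [if_neg ha, ih (seen ++ [pvNameOf sk]) c]
        simp only [List.map_cons, List.sum_cons, pvIndB, ha, Bool.false_eq_true, if_false,
          List.append_assoc, List.singleton_append, Prod.mk.injEq]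
        exact ⟨by ring, trivial⟩

-- the names of the first occurrences are exactly the deduplicated names
lemma pvFirsts_names (s : List (List (String × String))) :
    ∀ seen : List String, seen ++ (pvFirsts seen s).map pvNameOf = PySem.Set.update seen (s.map pvNameOf) := by
  induction s with
  | nil => intro seen; simp [pvFirsts, PySem.Set.update]
  | cons sk s ih =>
    intro seen
    simp only [pvFirsts, PySem.Set.update, List.map_cons, List.foldl_cons]
    by_cases hc : seen.contains (pvNameOf sk)
    · rw [if_pos hc]
      have hadd : PySem.Set.add seen (pvNameOf sk) = seen := by
        simp only [PySem.Set.add, PySem.Set.contains]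
        simp only [List.contains_eq_mem, decide_eq_true_eq] at hc
        simp [hc]
      rw [hadd]
      have := ih seen
      simp only [PySem.Set.update] at this
      exact this
    · rw [if_neg hc]
      have hadd : PySem.Set.add seen (pvNameOf sk) = seen ++ [pvNameOf sk] := by
        simp only [PySem.Set.add, PySem.Set.contains]
        simp only [List.contains_eq_mem, decide_eq_true_eq] at hc
        simp [hc]
      rw [hadd, List.map_cons]
      have := ih (seen ++ [pvNameOf sk])
      simp only [PySem.Set.update] at this
      rw [← this]
      simp

-- for a skill of the list, B's existence test decides exactly "more than one distinct source"
lemma pvIndB_eq_pvIndA (l : List (List (String × String))) (skill : List (String × String))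
    (hmem : skill ∈ l) : pvIndB l skill = pvIndA l (pvNameOf skill) := by
  unfold pvIndB pvIndA
  set S : List String := PySem.Set.ofList ((l.filter (fun t => pvNameOf t == pvNameOf skill)).map pvSourceOf) with hS
  have hsrc : pvSourceOf skill ∈ S := by
    rw [hS, PySem.Set.mem_ofList]
    exact List.mem_map_of_mem (List.mem_filter.mpr ⟨hmem, by simp⟩)
  have hnd : S.Nodup := PySem.Set.nodup_ofList _
  have hlen : PySem.Set.len S = (S.length : Int) := rfl
  by_cases ha : l.any (fun t => pvNameOf t == pvNameOf skill && !(pvSourceOf t == pvSourceOf skill))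
  · -- a differing source exists: S has ≥ 2 elements
    simp only [List.any_eq_true, Bool.and_eq_true, beq_iff_eq, Bool.not_eq_true', beq_eq_false_iff_ne] at ha
    obtain ⟨t, ht, hn, hs⟩ := ha
    have hx : pvSourceOf t ∈ S := by
      rw [hS, PySem.Set.mem_ofList]
      exact List.mem_map_of_mem (List.mem_filter.mpr ⟨ht, by simp [hn]⟩)
    have h2 : 1 < S.length := by
      rw [← List.toFinset_card_of_nodup hnd]
      exact Finset.one_lt_card.mpr ⟨_, List.mem_toFinset.mpr hx, _, List.mem_toFinset.mpr hsrc, hs⟩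
    simp only [List.any_eq_true] at *
    rw [if_pos, if_pos]
    · rw [hlen]; exact_mod_cast h2
    · exact ⟨_, ht, by simp [hn, hs]⟩
  · -- no differing source: every source of the name equals skill's, so S = [source]
    rw [if_neg ha, if_neg]
    intro h1
    rw [hlen] at h1
    have h1' : 1 < S.length := by exact_mod_cast h1
    rw [← List.toFinset_card_of_nodup hnd] at h1'
    obtain ⟨a, hax, b, hbx, hab⟩ := Finset.one_lt_card.mp h1'
    have hall : ∀ x ∈ S, x = pvSourceOf skill := by
      intro x hx
      rw [hS, PySem.Set.mem_ofList] at hx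
      obtain ⟨t, ht, rfl⟩ := List.mem_map.mp hx
      have ht' := List.mem_filter.mp ht
      by_contra hne
      exact ha (List.any_eq_true.mpr ⟨t, ht'.1, by
        simp only [Bool.and_eq_true, Bool.not_eq_true', beq_eq_false_iff_ne]
        exact ⟨ht'.2, hne⟩⟩)
    exact hab ((hall a (List.mem_toFinset.mp hax)).trans (hall b (List.mem_toFinset.mp hbx)).symm)

-- ===== A-side lemmas (from the grouping loop to the canonical per-name sum) =====

-- A's composite loop step (conditional empty-set insert, then in-place add) is one modify
lemma pvStepA_eq (d : PySem.Dict String (PySem.Set String)) (n src : String) :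
    (if d.contains n then d else d.insert n PySem.Set.empty).modify n PySem.Set.empty
        (fun s => PySem.Set.add s src)
      = d.modify n PySem.Set.empty (fun s => PySem.Set.add s src) := by
  by_cases h : d.contains n
  · simp [h]
  · simp only [Bool.not_eq_true] at h
    simp only [h, Bool.false_eq_true, if_false, PySem.Dict.modify,
      PySem.Dict.getD_insert_self, PySem.Dict.insert_insert_self,
      PySem.Dict.getD_of_not_contains]

-- the grouped dict's entry at n holds the distinct sources of n, in first-seen order
lemma pvGetD_groupA (l : List (List (String × String))) (d : PySem.Dict String (PySem.Set String)) (n : String) :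
    (l.foldl (fun d sk => d.modify (pvNameOf sk) PySem.Set.empty (fun s => PySem.Set.add s (pvSourceOf sk))) d).getD n PySem.Set.empty
      = PySem.Set.update (d.getD n PySem.Set.empty) ((l.filter (fun sk => pvNameOf sk == n)).map pvSourceOf) := by
  induction l generalizing d with
  | nil => simp [PySem.Set.update]
  | cons sk l ih =>
    simp only [List.foldl_cons, ih, List.filter_cons]
    by_cases h : pvNameOf sk = n
    · simp [h, PySem.Set.update]
    · rw [PySem.Dict.getD_modify_of_ne _ _ _ (Ne.symm h)]
      simp [h, PySem.Set.update]

-- ===== VERDICT (by name: the statement is the Claim_ definition above) =====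
theorem count_cross_validated_skills_py_spec : Claim_equal_count_cross_validated_skills_py := by
  intro all_skills _ _
  unfold Spec_count_cross_validated_skills_py
  unfold count_cross_validated_skills_py count_cross_validated_skills_py_alt
  simp only [pvStepA_eq]
  -- A side: keys are the deduplicated names, values the per-name distinct-source sets
  set F := all_skills.foldl (fun d sk => d.modify (pvNameOf sk) PySem.Set.empty (fun s => PySem.Set.add s (pvSourceOf sk))) PySem.Dict.empty with hF
  have hnodup : F.keys.Nodup :=
    PySem.Dict.nodup_keys_foldl_modify_key all_skills pvNameOf PySem.Set.empty
      (fun _ sk s => PySem.Set.add s (pvSourceOf sk)) PySem.Dict.empty (by simp [PySem.Dict.keys, PySem.Dict.empty])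
  have hkeys : F.keys = PySem.Set.ofList (all_skills.map pvNameOf) := by
    have h := PySem.Dict.keys_foldl_modify_key all_skills pvNameOf PySem.Set.empty
      (fun _ sk s => PySem.Set.add s (pvSourceOf sk)) PySem.Dict.empty
    rw [hF, h]
    simp [PySem.Set.update, PySem.Set.ofList_eq_foldl, PySem.Dict.keys, PySem.Dict.empty]
  have hvals := PySem.Dict.values_eq_map_keys F hnodup PySem.Set.empty
  rw [hvals, hkeys, List.map_map]
  have hgetD : ∀ n, F.getD n PySem.Set.empty = PySem.Set.ofList ((all_skills.filter (fun sk => pvNameOf sk == n)).map pvSourceOf) := by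
    intro n
    rw [hF, pvGetD_groupA, PySem.Dict.getD_empty]
    simp [PySem.Set.update, PySem.Set.ofList_eq_foldl]
  have hA : ((fun s => if 1 < PySem.Set.len s then (1 : Int) else 0) ∘ fun k => F.getD k PySem.Set.empty)
      = pvIndA all_skills := by
    funext n
    simp only [Function.comp_apply, hgetD, pvIndA]
  rw [hA]
  -- B side: fold characterisation, then per-element indicator equality
  rw [pvFoldB_eq all_skills all_skills [] 0]
  simp only [zero_add]
  have hmapB : (pvFirsts [] all_skills).map (pvIndB all_skills)
      = ((pvFirsts [] all_skills).map pvNameOf).map (pvIndA all_skills) := by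
    rw [List.map_map]
    exact List.map_congr_left (fun sk hsk =>
      pvIndB_eq_pvIndA all_skills sk (pvFirsts_subset all_skills [] sk hsk))
  have hnames : (pvFirsts [] all_skills).map pvNameOf = PySem.Set.ofList (all_skills.map pvNameOf) := by
    have := pvFirsts_names all_skills []
    simpa [PySem.Set.ofList_eq_foldl, PySem.Set.update] using this
  rw [hmapB, hnames]
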